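-- pv_equiv track=rewrite | github.com/ArsArcanumb/EushlatorV2 | eushlator/utils/code_utils.py | find_label_before
-- ===== SOURCE A (Python) =====
-- def find_label_before(code, label_template):
--     """
--     Return the line directly preceding the unique occurrence of `label_template`
--     in `code`. If the template occurs zero or multiple times, return "".
--
--     `code` is expected to be a list of lines (strings) as read from the script.
--     """
--     matches = []
--     seq_len = len(label_template)
--     # Slide a window of size `seq_len` over the file
--     for i in range(len(code) - seq_len + 1):
--         if code[i: i + seq_len] == label_template:
--             matches.append(i)
--
--     if len(matches) == 1:
--         return code[matches[0]-1]
--     else: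
--         return ""
-- ===== SOURCE B (Python) =====
-- def find_label_before(code, label_template):
--     """
--     Return the line directly preceding the unique occurrence of `label_template`
--     in `code`; "" if the template occurs zero or multiple times.
--
--     Different algorithm: instead of sliding a window and comparing slices,
--     build for each template line the set of positions where it occurs in
--     `code`, shift each set by the line's offset in the template, and
--     intersect: the intersection is exactly the set of occurrence starts.
--     """
--     m = len(label_template)
--     if m == 0:
--         # every position matches; unique only for empty code (no line before)
--         return ""
--     cand = None
--     for j, lab in enumerate(label_template):
--         s = {i - j for i, line in enumerate(code) if line == lab}
--         cand = s if cand is None else cand & s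
--         if not cand:
--             return ""
--     if len(cand) == 1:
--         (i,) = cand
--         return code[i - 1]
--     return ""
-- ===== Notes on version B (the rewrite author's own statement) =====
-- stated objective: alternative
-- what changed: B replaces A's sliding-window slice comparison by an inverted-index algorithm: for each template line it builds the set of positions where that line occurs in the file, shifts each set by the line's offset in the template, and intersects them, the intersection being exactly the set of occurrence starts.
-- outside the precondition, e.g. on find_label_before([], []): A raises IndexError, B returns ''
import Mathlib
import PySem

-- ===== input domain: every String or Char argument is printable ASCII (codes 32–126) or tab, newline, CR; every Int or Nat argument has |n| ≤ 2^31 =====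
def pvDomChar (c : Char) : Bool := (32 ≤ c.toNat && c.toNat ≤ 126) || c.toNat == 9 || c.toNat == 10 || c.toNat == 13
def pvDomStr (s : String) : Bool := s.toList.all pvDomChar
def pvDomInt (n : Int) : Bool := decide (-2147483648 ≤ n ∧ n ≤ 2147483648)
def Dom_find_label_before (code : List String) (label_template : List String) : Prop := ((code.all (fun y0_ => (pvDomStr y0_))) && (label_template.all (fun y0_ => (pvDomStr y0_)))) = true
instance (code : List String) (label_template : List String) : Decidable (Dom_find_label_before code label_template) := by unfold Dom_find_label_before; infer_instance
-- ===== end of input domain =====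

-- B replaces A's sliding-window slice comparison by an inverted-index algorithm: per template
-- line, the set of its positions in the file, shifted and intersected (an 'alternative' rewrite,
-- no speed claim).

-- ===== PORT A =====
def find_label_before (code : List String) (label_template : List String) : String :=
  let seq_len : Int := label_template.length
  let occs : List Int :=
    (PySem.List.pyRange 0 ((code.length : Int) - seq_len + 1) 1).foldl
      (fun acc i =>
        if PySem.List.slice code (some i) (some (i + seq_len)) == label_template then
          acc ++ [i] else acc) []
  if occs.length == 1 then
    -- code[matches[0]-1]; pyGet? is none exactly where Python raises (excluded by Pre_)
    (PySem.List.pyGet? code (PySem.List.pyGetD occs 0 0 - 1)).getD ""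
  else ""

-- ===== PORT B =====
-- Source B: {i - j for i, line in enumerate(code) if line == lab}
def pvPosSet (code : List String) (lab : String) (j : Int) : PySem.Set Int :=
  PySem.Set.ofList ((PySem.List.enumerate code).filterMap
    (fun p => if p.2 == lab then some (p.1 - j) else none))

-- Source B's loop after the first iteration: cand = cand & s; if not cand: return ""
-- (none = the early 'return ""' on an empty intersection)
def pvBLoop (code : List String) (c : PySem.Set Int) :
    List (Int × String) → Option (PySem.Set Int)
  | [] => some c
  | p :: L =>
    let c' := PySem.Set.inter c (pvPosSet code p.2 p.1)
    if c'.length == 0 then none else pvBLoop code c' L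

def find_label_before_alt (code : List String) (label_template : List String) : String :=
  if label_template.length == 0 then ""
  else
    match PySem.List.enumerate label_template with
    | [] => ""
    | p :: L =>
      -- first iteration: cand = s; if not cand: return ""
      let s0 := pvPosSet code p.2 p.1
      if s0.length == 0 then ""
      else
        match pvBLoop code s0 L with
        | none => ""
        | some S =>
          if S.length == 1 then
            -- (i,) = cand; code[i-1]: pyGet? is in range here (0 ≤ i < len(code), code nonempty)
            (PySem.List.pyGet? code (S.headD 0 - 1)).getD ""
          else ""

-- ===== PRECONDITION & SPEC =====
-- Pre_ excludes only code = [] with label_template = [], where A raises IndexError (code[-1] on []).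
def Pre_find_label_before (code : List String) (label_template : List String) : Prop :=
  ¬ (code = [] ∧ label_template = [])
instance (code : List String) (label_template : List String) : Decidable (Pre_find_label_before code label_template) := by unfold Pre_find_label_before; infer_instance

def pvWitness_find_label_before : List String × List String := (["a", "lbl", "ret"], ["lbl"])

def Spec_find_label_before (code : List String) (label_template : List String) (out : String) : Prop := out = find_label_before_alt code label_template
instance (code : List String) (label_template : List String) (out : String) : Decidable (Spec_find_label_before code label_template out) := by unfold Spec_find_label_before; infer_instance

-- ===== CLAIM (what is proved, stated in full; the proofs are below) =====
def Claim_equal_find_label_before : Prop := ∀ (code : List String) (label_template : List String), Dom_find_label_before code label_template → Pre_find_label_before code label_template → Spec_find_label_before code label_template (find_label_before code label_template)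

-- ===== LEMMAS AND PROOFS =====

-- Bool predicate: the template occurs at position k
def pvQ (code label_template : List String) (k : Nat) : Bool :=
  label_template.isPrefixOf (code.drop k)

-- the list of occurrence positions
def pvOcc (code label_template : List String) : List Nat :=
  (List.range code.length).filter (pvQ code label_template)

theorem pv_isPrefixOf_iff (lt xs : List String) : lt.isPrefixOf xs = true ↔ xs.take lt.length = lt := by
  rw [List.isPrefixOf_iff_prefix, List.prefix_iff_eq_take]
  exact ⟨fun h => h.symm, fun h => h.symm⟩

-- occurrence needs enough room
theorem pvQ_len_le {code lt : List String} {k : Nat} (h : pvQ code lt k = true) :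
    lt.length ≤ code.length - k := by
  have := List.IsPrefix.length_le (List.isPrefixOf_iff_prefix.mp h)
  simpa using this

-- pointwise characterization of an occurrence
theorem pvQ_iff_pointwise (code lt : List String) (k : Nat) :
    pvQ code lt k = true ↔
      (lt.length ≤ code.length - k ∧
        ∀ j, j < lt.length → code.getD (k + j) "" = lt.getD j "") := by
  by_cases hle : lt.length ≤ code.length - k
  · unfold pvQ
    rw [pv_isPrefixOf_iff]
    simp only [hle, true_and]
    constructor
    · intro h j hj
      have hkj : k + j < code.length := by omega
      have hjt : j < ((code.drop k).take lt.length).length := by simp; omega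
      have h2 : ((code.drop k).take lt.length)[j]? = lt[j]? := by rw [h]
      simp only [List.getElem?_eq_getElem hjt, List.getElem?_eq_getElem hj,
        Option.some.injEq] at h2
      rw [List.getElem_take, List.getElem_drop] at h2
      rw [List.getD_eq_getElem?_getD, List.getD_eq_getElem?_getD]
      simp only [List.getElem?_eq_getElem hkj, List.getElem?_eq_getElem hj, Option.getD_some]
      exact h2
    · intro h
      apply List.ext_getElem
      · simp; omega
      · intro j hj1 hj2
        have hj : j < lt.length := hj2
        have hkj : k + j < code.length := by omega
        have := h j hj
        rw [List.getElem_take, List.getElem_drop]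
        rw [List.getD_eq_getElem?_getD, List.getD_eq_getElem?_getD] at this
        simp only [List.getElem?_eq_getElem hkj, List.getElem?_eq_getElem hj,
          Option.getD_some] at this
        exact this
  · constructor
    · intro h; exact absurd (pvQ_len_le h) hle
    · intro h; exact absurd h.1 hle

-- A's slice test agrees with pvQ
theorem pv_sliceTest_eq_pvQ (code lt : List String) (k : Nat) :
    (PySem.List.slice code (some ((k : Int))) (some ((k : Int) + (lt.length : Int))) == lt)
      = pvQ code lt k := by
  rw [PySem.List.slice_natCast_add]
  unfold pvQ
  rw [Bool.eq_iff_iff, beq_iff_eq, pv_isPrefixOf_iff]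

-- A's foldl produces exactly the occurrence positions (as Ints), over its own range
theorem pv_occsA (code lt : List String) :
    ((PySem.List.pyRange 0 ((code.length : Int) - (lt.length : Int) + 1) 1).foldl
      (fun acc i =>
        if PySem.List.slice code (some i) (some (i + (lt.length : Int))) == lt then
          acc ++ [i] else acc) [])
    = ((List.range (((code.length : Int) - (lt.length : Int) + 1).toNat)).filter
        (pvQ code lt)).map (fun (k : Nat) => (k : Int)) := by
  rw [PySem.List.foldl_append_if_eq_filter, PySem.List.pyRange_one]
  simp only [List.nil_append, zero_add, sub_zero, List.filter_map]
  exact congrArg (List.map fun (k : Nat) => (k : Int))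
    (List.filter_congr (fun k _ => by
      simpa [Function.comp] using pv_sliceTest_eq_pvQ code lt k))

-- occurrences all lie below any bound past which pvQ is false
theorem pv_filter_range_high (code lt : List String) (a b : Nat) (hab : a ≤ b)
    (hfa : ∀ k, a ≤ k → pvQ code lt k = false) :
    (List.range b).filter (pvQ code lt) = (List.range a).filter (pvQ code lt) := by
  rw [List.range_eq_range' (n := b), show b = a + (b - a) by omega, ← List.range'_append,
    List.filter_append, ← List.range_eq_range']
  have h2 : (List.range' (0 + 1 * a) (b - a) 1).filter (pvQ code lt) = [] := by
    apply List.filter_eq_nil_iff.mpr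
    intro k hk
    have hak : a ≤ k := by
      have := (List.mem_range'_1.mp (by simpa using hk)).1
      omega
    simp [hfa k hak]
  rw [h2, List.append_nil]

-- past position length - |lt| there is no occurrence (nonempty template)
theorem pv_no_late_occ (code lt : List String) (hm : lt ≠ []) (k : Nat)
    (hk : code.length < k + lt.length) : pvQ code lt k = false := by
  have hm1 : 0 < lt.length := List.length_pos_of_ne_nil hm
  cases hq : pvQ code lt k
  · rfl
  · exact absurd (pvQ_len_le hq) (by omega)

-- for a nonempty template the clamped range bound can be replaced by code.length
theorem pv_filter_range_ext (code lt : List String) (hm : lt ≠ []) :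
    (List.range (((code.length : Int) - (lt.length : Int) + 1).toNat)).filter (pvQ code lt)
      = pvOcc code lt := by
  have hm1 : 0 < lt.length := List.length_pos_of_ne_nil hm
  unfold pvOcc
  set B := (((code.length : Int) - (lt.length : Int) + 1)).toNat with hB
  by_cases hle : lt.length ≤ code.length
  · have hBle : B ≤ code.length := by omega
    rw [pv_filter_range_high code lt B code.length hBle
      (fun k hk => pv_no_late_occ code lt hm k (by omega))]
  · have hBv : B = 0 := by omega
    rw [hBv,
      pv_filter_range_high code lt 0 code.length (by omega)
        (fun k hk => pv_no_late_occ code lt hm k (by omega))]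

-- characterization of A's result for a nonempty template
theorem pvA_char (code lt : List String) (hm : lt ≠ []) :
    find_label_before code lt =
      match pvOcc code lt with
      | [j] => (PySem.List.pyGet? code ((j : Int) - 1)).getD ""
      | _ => "" := by
  unfold find_label_before
  dsimp only
  rw [pv_occsA, pv_filter_range_ext code lt hm]
  rcases h : pvOcc code lt with _ | ⟨j, _ | ⟨j2, rest⟩⟩
  · simp
  · simp [PySem.List.pyGetD_zero_cons]
  · simp

-- membership in pvOcc
theorem pv_mem_occ (code lt : List String) (k : Nat) :
    k ∈ pvOcc code lt ↔ k < code.length ∧ pvQ code lt k = true := by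
  unfold pvOcc
  simp [List.mem_filter]

-- membership in B's per-line position set
theorem pv_mem_posSet (code : List String) (lab : String) (j : Int) (x : Int) :
    x ∈ pvPosSet code lab j ↔
      ∃ k : Nat, k < code.length ∧ code.getD k "" = lab ∧ x = (k : Int) - j := by
  unfold pvPosSet
  rw [PySem.Set.mem_ofList, List.mem_filterMap]
  constructor
  · rintro ⟨p, hp, hx⟩
    obtain ⟨k, hk, rfl⟩ := (PySem.List.mem_enumerate_iff _ _ _).mp hp
    simp only [zero_add] at hx
    by_cases hlab : ((code[k] : String) == lab) = true
    · rw [if_pos hlab] at hx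
      simp only [Option.some.injEq] at hx
      rw [beq_iff_eq] at hlab
      refine ⟨k, hk, ?_, hx.symm⟩
      rw [List.getD_eq_getElem?_getD, List.getElem?_eq_getElem hk, Option.getD_some]
      exact hlab
    · rw [if_neg hlab] at hx
      exact absurd hx (by simp)
  · rintro ⟨k, hk, hlab, rfl⟩
    refine ⟨((k : Int), code[k]), (PySem.List.mem_enumerate_iff _ _ _).mpr ⟨k, hk, by simp⟩, ?_⟩
    have : code[k] = lab := by
      rw [List.getD_eq_getElem?_getD, List.getElem?_eq_getElem hk, Option.getD_some] at hlab
      exact hlab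
    simp [this]

theorem pv_nodup_posSet (code : List String) (lab : String) (j : Int) :
    (pvPosSet code lab j).Nodup := PySem.Set.nodup_ofList _

-- B's loop over the remaining (index, line) pairs, started from a set C:
-- either it runs to completion with the full intersection, or it exits early
-- and then the full intersection is empty
theorem pvBLoop_char (code : List String) (L : List (Int × String)) :
    ∀ C : PySem.Set Int, C.Nodup →
      (∃ S : PySem.Set Int, pvBLoop code C L = some S ∧ S.Nodup ∧
        ∀ x, x ∈ S ↔ (x ∈ C ∧ ∀ p ∈ L, x ∈ pvPosSet code p.2 p.1)) ∨
      (pvBLoop code C L = none ∧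
        ∀ x, ¬ (x ∈ C ∧ ∀ p ∈ L, x ∈ pvPosSet code p.2 p.1)) := by
  induction L with
  | nil => intro C hC; exact Or.inl ⟨C, rfl, hC, fun x => by simp⟩
  | cons p L ih =>
    intro C hC
    by_cases hemp : (PySem.Set.inter C (pvPosSet code p.2 p.1)).length == 0
    · refine Or.inr ⟨?_, ?_⟩
      · show (if (PySem.Set.inter C (pvPosSet code p.2 p.1)).length == 0 then none
            else pvBLoop code (PySem.Set.inter C (pvPosSet code p.2 p.1)) L) = none
        rw [if_pos hemp]
      · rintro x ⟨h1, h2⟩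
        have hx : x ∈ PySem.Set.inter C (pvPosSet code p.2 p.1) :=
          (PySem.Set.mem_inter _ _ _).mpr ⟨h1, h2 p List.mem_cons_self⟩
        have : PySem.Set.inter C (pvPosSet code p.2 p.1) = [] :=
          List.length_eq_zero_iff.mp (by simpa using hemp)
        rw [this] at hx
        exact absurd hx (List.not_mem_nil)
    · have hrun : pvBLoop code C (p :: L)
          = pvBLoop code (PySem.Set.inter C (pvPosSet code p.2 p.1)) L := by
        show (if (PySem.Set.inter C (pvPosSet code p.2 p.1)).length == 0 then none
            else pvBLoop code (PySem.Set.inter C (pvPosSet code p.2 p.1)) L) = _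
        rw [if_neg hemp]
      rcases ih (PySem.Set.inter C (pvPosSet code p.2 p.1)) (PySem.Set.nodup_inter _ _ hC)
        with ⟨S, hS, hnd, hmem⟩ | ⟨hS, hmem⟩
      · refine Or.inl ⟨S, hrun ▸ hS, hnd, fun x => ?_⟩
        rw [hmem x, PySem.Set.mem_inter]
        constructor
        · rintro ⟨⟨h1, h2⟩, h3⟩
          refine ⟨h1, fun q hq => ?_⟩
          rcases List.mem_cons.mp hq with hq | hq
          · exact hq ▸ h2
          · exact h3 q hq
        · rintro ⟨h1, h2⟩
          exact ⟨⟨h1, h2 p List.mem_cons_self⟩, fun q hq => h2 q (List.mem_cons_of_mem _ hq)⟩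
      · refine Or.inr ⟨hrun ▸ hS, ?_⟩
        rintro x ⟨h1, h2⟩
        exact hmem x ⟨(PySem.Set.mem_inter _ _ _).mpr ⟨h1, h2 p List.mem_cons_self⟩,
          fun q hq => h2 q (List.mem_cons_of_mem _ hq)⟩

-- the intersection set holds exactly the (cast) occurrence positions
theorem pv_cond_iff_occ (code : List String) (lt : List String) (hm : lt ≠ []) (x : Int) :
    (∀ p ∈ PySem.List.enumerate lt, x ∈ pvPosSet code p.2 p.1) ↔
      ∃ k : Nat, k ∈ pvOcc code lt ∧ x = (k : Int) := by
  constructor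
  · intro h
    obtain ⟨l0, rest, rfl⟩ := List.exists_cons_of_ne_nil hm
    -- j = 0 gives nonnegativity
    have h0 : x ∈ pvPosSet code l0 0 := by
      apply h ((0 : Int), l0)
      rw [PySem.List.enumerate_cons]
      simp
    obtain ⟨k0, hk0, _, hx0⟩ := (pv_mem_posSet code l0 0 x).mp h0
    have hxk : x = (k0 : Int) := by omega
    subst hxk
    set lt := l0 :: rest with hlt
    refine ⟨k0, ?_, rfl⟩
    rw [pv_mem_occ]
    refine ⟨hk0, ?_⟩
    rw [pvQ_iff_pointwise]
    have hpt : ∀ j, j < lt.length → k0 + j < code.length ∧ code.getD (k0 + j) "" = lt.getD j "" := by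
      intro j hj
      have hpj : ((j : Int), lt[j]) ∈ PySem.List.enumerate lt :=
        (PySem.List.mem_enumerate_iff _ _ _).mpr ⟨j, hj, by simp⟩
      have := h _ hpj
      obtain ⟨k, hk, hlab, hxk⟩ := (pv_mem_posSet code lt[j] (j : Int) ((k0 : Int))).mp this
      have hkk : k = k0 + j := by omega
      subst hkk
      refine ⟨hk, ?_⟩
      rw [hlab, List.getD_eq_getElem?_getD, List.getElem?_eq_getElem hj, Option.getD_some]
    constructor
    · have hlast := hpt (lt.length - 1) (by
        have := List.length_pos_of_ne_nil hm; omega)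
      have := (hpt (lt.length - 1) (by have := List.length_pos_of_ne_nil hm; omega)).1
      have hl1 : 0 < lt.length := List.length_pos_of_ne_nil hm
      omega
    · intro j hj
      exact (hpt j hj).2
  · rintro ⟨k, hk, rfl⟩
    rw [pv_mem_occ] at hk
    obtain ⟨hkn, hq⟩ := hk
    rw [pvQ_iff_pointwise] at hq
    intro p hp
    obtain ⟨j, hj, rfl⟩ := (PySem.List.mem_enumerate_iff _ _ _).mp hp
    rw [pv_mem_posSet]
    refine ⟨k + j, by omega, ?_, by simp⟩
    rw [(hq.2 j hj), List.getD_eq_getElem?_getD, List.getElem?_eq_getElem hj, Option.getD_some]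

-- splitting the full template condition at its head line
theorem pv_cons_cond (code : List String) (l0 : String) (rest : List String) (x : Int) :
    ((x ∈ pvPosSet code l0 0 ∧ ∀ p ∈ PySem.List.enumerate rest 1, x ∈ pvPosSet code p.2 p.1)
      ↔ ∀ p ∈ PySem.List.enumerate (l0 :: rest), x ∈ pvPosSet code p.2 p.1) := by
  rw [PySem.List.enumerate_cons]
  simp only [zero_add]
  constructor
  · rintro ⟨h1, h2⟩ p hp
    rcases List.mem_cons.mp hp with hp | hp
    · exact hp ▸ h1
    · exact h2 p hp
  · intro h
    exact ⟨h _ List.mem_cons_self, fun p hp => h p (List.mem_cons_of_mem _ hp)⟩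

-- if no integer satisfies the full condition there is no occurrence
theorem pv_occ_nil_of_nocond (code lt : List String) (hm : lt ≠ [])
    (h : ∀ x : Int, ¬ ∀ p ∈ PySem.List.enumerate lt, x ∈ pvPosSet code p.2 p.1) :
    pvOcc code lt = [] := by
  cases hocc : pvOcc code lt with
  | nil => rfl
  | cons k ks =>
    exact absurd ((pv_cond_iff_occ code lt hm ((k : Int))).mpr ⟨k, by rw [hocc]; simp, rfl⟩)
      (h ((k : Int)))

-- characterization of B's result for a nonempty template (same shape as A's)
theorem pvB_char (code lt : List String) (hm : lt ≠ []) :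
    find_label_before_alt code lt =
      match pvOcc code lt with
      | [j] => (PySem.List.pyGet? code ((j : Int) - 1)).getD ""
      | _ => "" := by
  obtain ⟨l0, rest, rfl⟩ := List.exists_cons_of_ne_nil hm
  set lt := l0 :: rest with hlt
  unfold find_label_before_alt
  rw [if_neg (by simp [hlt])]
  rw [show PySem.List.enumerate lt = ((0 : Int), l0) :: PySem.List.enumerate rest 1 by
    rw [PySem.List.enumerate_cons]; norm_num]
  dsimp only
  by_cases hse : ((pvPosSet code l0 0).length == 0) = true
  · rw [if_pos hse]
    have hempty : pvPosSet code l0 0 = [] := List.length_eq_zero_iff.mp (by simpa using hse)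
    have hocc : pvOcc code lt = [] := by
      apply pv_occ_nil_of_nocond code lt hm
      intro x hx
      have hx0 : x ∈ pvPosSet code l0 0 := ((pv_cons_cond code l0 rest x).mpr hx).1
      rw [hempty] at hx0
      exact absurd hx0 List.not_mem_nil
    rw [hocc]
  · rw [if_neg hse]
    rcases pvBLoop_char code (PySem.List.enumerate rest 1) (pvPosSet code l0 0)
        (pv_nodup_posSet code l0 0) with ⟨S, hS, hnd, hmem⟩ | ⟨hS, hmem⟩
    · rw [hS]
      dsimp only
      have hmem' : ∀ x, x ∈ S ↔ x ∈ (pvOcc code lt).map (fun (k : Nat) => (k : Int)) := by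
        intro x
        rw [hmem x, pv_cons_cond code l0 rest x, pv_cond_iff_occ code lt hm x, List.mem_map]
        constructor
        · rintro ⟨k, hk, rfl⟩; exact ⟨k, hk, rfl⟩
        · rintro ⟨k, hk, rfl⟩; exact ⟨k, hk, rfl⟩
      have hndocc : ((pvOcc code lt).map (fun (k : Nat) => (k : Int))).Nodup := by
        apply List.Nodup.map (fun a b h => by exact_mod_cast h)
        exact (List.nodup_range).filter _
      have hperm : S.Perm ((pvOcc code lt).map (fun (k : Nat) => (k : Int))) :=
        (List.perm_ext_iff_of_nodup hnd hndocc).mpr hmem'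
      have hlen : S.length = (pvOcc code lt).length := by
        rw [hperm.length_eq, List.length_map]
      rcases hocc : pvOcc code lt with _ | ⟨j, _ | ⟨j2, r⟩⟩
      · rw [if_neg (by simp [hlen, hocc])]
      · have hlen1 : S.length = 1 := by rw [hlen, hocc]; rfl
        rw [if_pos (by simp [hlen1])]
        obtain ⟨x, hx⟩ := List.length_eq_one_iff.mp hlen1
        have hxj : x = (j : Int) := by
          have : x ∈ S := by rw [hx]; simp
          have := (hmem' x).mp this
          rw [hocc] at this
          simpa using this
        subst hxj
        rw [hx]
        rfl
      · rw [if_neg (by simp [hlen, hocc])]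
    · rw [hS]
      dsimp only
      have hocc : pvOcc code lt = [] := by
        apply pv_occ_nil_of_nocond code lt hm
        intro x hx
        exact hmem x ((pv_cons_cond code l0 rest x).mpr hx)
      rw [hocc]

-- ===== VERDICT (by name: the statement is the Claim_ definition above) =====
theorem find_label_before_spec : Claim_equal_find_label_before := by
  unfold Claim_equal_find_label_before
  intro code lt _ hpre
  unfold Spec_find_label_before
  by_cases hm : lt = []
  · -- empty template: both sides return ""
    subst hm
    have hn : code ≠ [] := fun h => hpre ⟨h, rfl⟩
    have hallQ : ∀ k, pvQ code [] k = true := by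
      intro k; simp [pvQ, List.isPrefixOf]
    have hA : find_label_before code [] = "" := by
      unfold find_label_before
      dsimp only
      rw [pv_occsA]
      have hn1 : 0 < code.length := List.length_pos_of_ne_nil hn
      have hBn : (((code.length : Int) - (([] : List String).length : Int) + 1)).toNat
          = code.length + 1 := by simp
      rw [hBn, List.filter_eq_self.mpr (fun k _ => hallQ k)]
      rw [show (((List.range (code.length + 1)).map (fun (k : Nat) => (k : Int))).length == 1)
          = false by simp [beq_eq_false_iff_ne]; omega]
      simp
    rw [hA]
    unfold find_label_before_alt
    rw [if_pos (by simp)]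
  · rw [pvA_char code lt hm, pvB_char code lt hm]
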